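-- pv_equiv track=rewrite | github.com/pypi-data/pypi-mirror-58 | packages/CombCov/CombCov-0.6.4.tar.gz/CombCov-0.6.4/demo/word_set.py | _basis_of
-- ===== SOURCE A (Python) =====
-- def _basis_of(words):
--     basis = set()
--     words = list(reversed(sorted(words, key=len)))
--     for i in range(len(words)):
--         candidat = words[i]
--         if all(word not in candidat for word in words[i + 1:]):
--             basis.add(candidat)
--     return frozenset(basis)
-- ===== SOURCE B (Python) =====
-- def _has_proper_sub(w, vocab):
--     # does any strict substring of w (length < len(w)) occur in vocab?
--     n = len(w)
--     for length in range(n):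
--         for i in range(n - length + 1):
--             if w[i:i + length] in vocab:
--                 return True
--     return False
--
--
-- def _basis_of(words):
--     vocab = set(words)
--     basis = []
--     seen = set()
--     for w in sorted(words, key=len):
--         if w not in seen:
--             seen.add(w)
--             if not _has_proper_sub(w, vocab):
--                 basis.append(w)
--     return frozenset(reversed(basis))
-- ===== Notes on version B (the rewrite author's own statement) =====
-- stated objective: faster
-- what changed: A sorts the words by length descending and, for each word, scans all later (shorter) words testing each as a substring; B instead builds one hash set of all words and tests each word by probing every strict substring of it against that set, collecting first-seen survivors shortest-first.
import Mathlib
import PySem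

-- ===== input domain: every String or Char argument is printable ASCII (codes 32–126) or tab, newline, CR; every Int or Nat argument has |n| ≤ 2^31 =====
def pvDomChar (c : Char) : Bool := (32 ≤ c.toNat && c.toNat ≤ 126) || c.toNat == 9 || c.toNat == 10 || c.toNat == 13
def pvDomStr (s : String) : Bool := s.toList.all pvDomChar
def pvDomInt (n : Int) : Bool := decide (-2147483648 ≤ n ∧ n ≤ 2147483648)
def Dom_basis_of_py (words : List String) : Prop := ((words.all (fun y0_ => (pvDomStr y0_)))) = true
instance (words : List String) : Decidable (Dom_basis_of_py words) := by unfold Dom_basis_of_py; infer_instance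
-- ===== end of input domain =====

-- B replaces A's quadratic pairwise "is any other word a substring of this one" scan by a hash set
-- of the words probed with every strict substring of each word: linear in the number of words.

-- ===== PORT A =====
def basis_of_py (words : List String) : List String :=
  let ws := (PySem.List.sorted words (fun w => PySem.Str.len w)).reverse
  let basis : PySem.Set String :=
    (PySem.List.pyRange 0 (PySem.List.len ws) 1).foldl
      (fun (basis : PySem.Set String) i =>
        let candidat := PySem.List.pyGetD ws i ""
        if (PySem.List.slice ws (some (i + 1)) none).all
            (fun word => !(PySem.Str.isIn word candidat))
        then PySem.Set.add basis candidat else basis)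
      PySem.Set.empty
  basis

-- ===== PORT B =====
def hasProperSubPy (w : String) (vocab : PySem.Set String) : Bool :=
  let n := PySem.Str.len w
  (PySem.List.pyRange 0 n 1).any (fun len =>
    (PySem.List.pyRange 0 (n - len + 1) 1).any (fun i =>
      PySem.Set.contains vocab (PySem.Str.slice w (some i) (some (i + len)))))

def basis_of_py_alt (words : List String) : List String :=
  let vocab := PySem.Set.ofList words
  let st :=
    (PySem.List.sorted words (fun w => PySem.Str.len w)).foldl
      (fun (st : List String × PySem.Set String) w =>
        if !(PySem.Set.contains st.2 w) then
          (if !(hasProperSubPy w vocab) then st.1 ++ [w] else st.1, PySem.Set.add st.2 w)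
        else st)
      ([], PySem.Set.empty)
  PySem.Set.ofList st.1.reverse

-- ===== PRECONDITION & SPEC =====
def Spec_basis_of_py (words : List String) (out : List String) : Prop := out = basis_of_py_alt words
instance (words : List String) (out : List String) : Decidable (Spec_basis_of_py words out) := by unfold Spec_basis_of_py; infer_instance

-- ===== CLAIM (what is proved, stated in full; the proofs are below) =====
def Claim_equal_basis_of_py : Prop := ∀ (words : List String), Dom_basis_of_py words → Spec_basis_of_py words (basis_of_py words)

-- ===== LEMMAS AND PROOFS =====

/-- A's loop, in structural form: walk the (descending) list, keeping a word iff no word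
of the tail occurs in it. -/
def selA : List String → List String
  | [] => []
  | c :: t => if t.all (fun v => !(PySem.Str.isIn v c)) then c :: selA t else selA t

/-- The common pure selection: keep `c` iff it is a last occurrence and `q c` holds. -/
def selP (q : String → Bool) : List String → List String
  | [] => []
  | c :: t => if c ∉ t ∧ q c = true then c :: selP q t else selP q t

/-- B's loop, basis component, in structural form. -/
def selB (q : String → Bool) (s : PySem.Set String) : List String → List String
  | [] => []
  | w :: t => if w ∉ s then (if q w then [w] else []) ++ selB q (PySem.Set.add s w) t
              else selB q s t

/-- A's loop as a recursion carrying the accumulated set. -/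
def loopA (b : PySem.Set String) : List String → PySem.Set String
  | [] => b
  | c :: t => loopA (if t.all (fun v => !(PySem.Str.isIn v c)) then PySem.Set.add b c else b) t

theorem loopA_eq_update (l : List String) : ∀ b, loopA b l = PySem.Set.update b (selA l) := by
  induction l with
  | nil => intro b; simp [loopA, selA, PySem.Set.update_nil]
  | cons c t ih =>
      intro b
      simp only [loopA, selA]
      by_cases h : t.all (fun v => !(PySem.Str.isIn v c)) = true
      · rw [if_pos h, if_pos h, ih, PySem.Set.update_cons]
      · rw [if_neg h, if_neg h, ih]

theorem rangeA_eq_loopA (ws : List String) : ∀ (a : Nat) (b : PySem.Set String),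
    (PySem.List.pyRange (a : Int) (ws.length : Int) 1).foldl
      (fun (basis : PySem.Set String) i =>
        if (PySem.List.slice ws (some (i + 1)) none).all
            (fun word => !(PySem.Str.isIn word (PySem.List.pyGetD ws i ""))) then
          PySem.Set.add basis (PySem.List.pyGetD ws i "")
        else basis)
      b
    = loopA b (ws.drop a) := by
  intro a
  induction h : ws.length - a using Nat.strong_induction_on generalizing a with
  | _ n ih =>
    intro b
    by_cases ha : a < ws.length
    · rw [PySem.List.pyRange_one_cons (by exact_mod_cast ha)]
      have hget : PySem.List.pyGetD ws (a : Int) "" = ws[a] := by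
        simp [PySem.List.pyGetD_natCast, List.getD_eq_getElem?_getD, ha]
      have hslice : PySem.List.slice ws (some ((a : Int) + 1)) none = ws.drop (a + 1) := by
        have : ((a : Int) + 1) = ((a + 1 : Nat) : Int) := by push_cast; ring
        rw [this, PySem.List.slice_from_natCast]
      have hdrop : ws.drop a = ws[a] :: ws.drop (a + 1) := List.drop_eq_getElem_cons ha
      have hrec := ih (ws.length - (a + 1)) (by omega) (a + 1) rfl
      simp only [List.foldl_cons, hget, hslice]
      have : ((a : Int) + 1) = ((a + 1 : Nat) : Int) := by push_cast; ring
      rw [this, hrec, hdrop]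
      simp [loopA]
    · rw [PySem.List.pyRange_one_eq_nil (by exact_mod_cast Nat.le_of_not_lt ha)]
      rw [List.drop_eq_nil_of_le (by omega)]
      simp [loopA]

theorem selA_subset {l : List String} {x : String} (h : x ∈ selA l) : x ∈ l := by
  induction l with
  | nil => simp [selA] at h
  | cons c t ih =>
      by_cases hc : t.all (fun v => !(PySem.Str.isIn v c)) = true
      · simp only [selA, if_pos hc, List.mem_cons] at h
        rcases h with h | h
        · simp [h]
        · exact List.mem_cons_of_mem _ (ih h)
      · simp only [selA, if_neg hc] at h
        exact List.mem_cons_of_mem _ (ih h)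

theorem selA_nodup (l : List String) : (selA l).Nodup := by
  induction l with
  | nil => simp [selA]
  | cons c t ih =>
      by_cases hc : t.all (fun v => !(PySem.Str.isIn v c)) = true
      · simp only [selA, if_pos hc]
        refine List.nodup_cons.mpr ⟨fun hmem => ?_, ih⟩
        have hct : c ∈ t := selA_subset hmem
        have h2 : PySem.Str.isIn c c = true :=
          (PySem.Str.isIn_iff_infix c c).mpr (List.infix_refl _)
        have := (List.all_eq_true.mp hc) c hct
        rw [h2] at this
        simp at this
      · simpa only [selA, if_neg hc] using ih

theorem hasSub_iff (words : List String) (w : String) :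
    hasProperSubPy w (PySem.Set.ofList words) = true ↔
      ∃ v ∈ words, v.toList.length < w.toList.length ∧ v.toList <:+: w.toList := by
  simp only [hasProperSubPy, List.any_eq_true, PySem.List.mem_pyRange_one, PySem.Str.len_eq]
  constructor
  · rintro ⟨L, ⟨hL0, hLn⟩, i, ⟨hi0, hin⟩, hcont⟩
    have hmem : PySem.Str.slice w (some i) (some (i + L)) ∈ words := by
      have := (PySem.Set.contains_iff _ _).mp hcont
      simpa [PySem.Set.mem_ofList] using this
    refine ⟨_, hmem, ?_, ?_⟩
    · have htl : (PySem.Str.slice w (some i) (some (i + L))).toList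
          = (w.toList.drop i.toNat).take L.toNat := by
        simp only [PySem.Str.toList_slice, PySem.Chars.slice_eq_listSlice]
        rw [PySem.List.slice_toNat _ hi0 (by omega)]
        congr 1
        omega
      rw [htl]
      have h1 : ((w.toList.drop i.toNat).take L.toNat).length = L.toNat := by
        rw [List.length_take, List.length_drop]
        omega
      rw [h1]
      omega
    · have htl : (PySem.Str.slice w (some i) (some (i + L))).toList
          = (w.toList.drop i.toNat).take L.toNat := by
        simp only [PySem.Str.toList_slice, PySem.Chars.slice_eq_listSlice]
        rw [PySem.List.slice_toNat _ hi0 (by omega)]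
        congr 1
        omega
      rw [htl]
      exact ((w.toList.drop i.toNat).take_prefix L.toNat).isInfix.trans
        (w.toList.drop_suffix i.toNat).isInfix
  · rintro ⟨v, hv, hlen, s1, t1, hst⟩
    have hlens : s1.length + v.toList.length + t1.length = w.toList.length := by
      have := congrArg List.length hst
      simp only [List.length_append] at this
      omega
    refine ⟨(v.toList.length : Int), ⟨by omega, by exact_mod_cast hlen⟩,
            (s1.length : Int), ⟨by omega, by omega⟩, ?_⟩
    have hslice : PySem.Str.slice w (some (s1.length : Int))
        (some ((s1.length : Int) + (v.toList.length : Int))) = v := by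
      apply String.toList_inj.mp
      simp only [PySem.Str.toList_slice, PySem.Chars.slice_eq_listSlice]
      rw [PySem.List.slice_toNat _ (by omega) (by omega)]
      have h1 : ((s1.length : Int) + (v.toList.length : Int)).toNat - (s1.length : Int).toNat
          = v.toList.length := by omega
      have h2 : ((s1.length : Int)).toNat = s1.length := by omega
      rw [h1, h2, ← hst, List.append_assoc, List.drop_left, List.take_left]
    rw [hslice]
    exact (PySem.Set.contains_iff _ _).mpr (by simpa [PySem.Set.mem_ofList] using hv)

theorem selA_eq_selP (words : List String) :
    ∀ l : List String,
      l.Pairwise (fun a b => b.toList.length ≤ a.toList.length) →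
      (∀ c ∈ l, ∀ v ∈ words, v.toList.length < c.toList.length → v ∈ l) →
      (∀ c ∈ l, c ∈ words) →
      selA l = selP (fun c => !(hasProperSubPy c (PySem.Set.ofList words))) l := by
  intro l
  induction l with
  | nil => intro _ _ _; simp [selA, selP]
  | cons c t ih =>
      intro hpw hcl hsub
      have hpw' := (List.pairwise_cons.mp hpw)
      have hcond : (t.all (fun v => !(PySem.Str.isIn v c)) = true) ↔
          (c ∉ t ∧ (!(hasProperSubPy c (PySem.Set.ofList words))) = true) := by
        rw [Bool.not_eq_eq_eq_not, Bool.not_true, ← Bool.not_eq_true, hasSub_iff,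
            List.all_eq_true]
        constructor
        · intro hall
          constructor
          · intro hct
            have h3 := hall c hct
            simp only [Bool.not_eq_true'] at h3
            rw [← Bool.not_eq_true, PySem.Str.isIn_iff_infix] at h3
            exact h3 (List.infix_refl _)
          · rintro ⟨v, hvw, hvlen, hvinf⟩
            have hvl : v ∈ c :: t := hcl c (List.mem_cons_self) v hvw hvlen
            have hvt : v ∈ t := by
              rcases List.mem_cons.mp hvl with h | h
              · subst h; omega
              · exact h
            have h3 := hall v hvt
            simp only [Bool.not_eq_true'] at h3
            rw [← Bool.not_eq_true, PySem.Str.isIn_iff_infix] at h3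
            exact h3 hvinf
        · rintro ⟨hct, hP⟩ v hvt
          simp only [Bool.not_eq_true']
          rw [← Bool.not_eq_true, PySem.Str.isIn_iff_infix]
          intro hinf
          have hle : v.toList.length ≤ c.toList.length := hinf.length_le
          rcases lt_or_eq_of_le hle with hlt | heq
          · exact hP ⟨v, hsub v (List.mem_cons_of_mem _ hvt), hlt, hinf⟩
          · have : v.toList = c.toList := hinf.eq_of_length_le (by omega)
            exact hct (String.toList_inj.mp this ▸ hvt)
      have iht : selA t = selP (fun c => !(hasProperSubPy c (PySem.Set.ofList words))) t := by
        refine ih hpw'.2 ?_ (fun x hx => hsub x (List.mem_cons_of_mem _ hx))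
        intro c' hc' v hvw hvlen
        have hvl : v ∈ c :: t := hcl c' (List.mem_cons_of_mem _ hc') v hvw hvlen
        rcases List.mem_cons.mp hvl with h | h
        · exfalso
          have := hpw'.1 c' hc'
          subst h
          omega
        · exact h
      by_cases hA : t.all (fun v => !(PySem.Str.isIn v c)) = true
      · rw [selA, if_pos hA, selP, if_pos (by exact_mod_cast hcond.mp hA), iht]
      · rw [selA, if_neg hA, selP, if_neg (fun h => hA (hcond.mpr h)), iht]

theorem foldB_eq_selB (vocab : PySem.Set String) (l : List String) :
    ∀ (b : List String) (s : PySem.Set String),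
      l.foldl
        (fun (st : List String × PySem.Set String) w =>
          if !(PySem.Set.contains st.2 w) then
            (if !(hasProperSubPy w vocab) then st.1 ++ [w] else st.1, PySem.Set.add st.2 w)
          else st)
        (b, s)
      = (b ++ selB (fun w => !(hasProperSubPy w vocab)) s l, PySem.Set.update s l) := by
  induction l with
  | nil => intro b s; simp [selB, PySem.Set.update_nil]
  | cons w t ih =>
      intro b s
      by_cases hw : w ∈ s
      · have hc : PySem.Set.contains s w = true := (PySem.Set.contains_iff _ _).mpr hw
        rw [List.foldl_cons]
        simp only [hc, Bool.not_true]
        rw [if_neg (by simp), ih, selB, if_neg (by simpa using hw), PySem.Set.update_cons,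
            PySem.Set.add_of_mem hw]
      · have hc : PySem.Set.contains s w = false := by
          rw [← Bool.not_eq_true, PySem.Set.contains_iff]; exact hw
        rw [List.foldl_cons]
        simp only [hc, Bool.not_false, if_true]
        rw [ih, selB, if_pos hw, PySem.Set.update_cons]
        by_cases hq : (!(hasProperSubPy w vocab)) = true
        · rw [if_pos hq, if_pos hq, List.append_assoc]
        · rw [if_neg hq, if_neg hq, List.nil_append]

theorem selB_append (q : String → Bool) (xs : List String) :
    ∀ (s : PySem.Set String) (ys : List String),
      selB q s (xs ++ ys) = selB q s xs ++ selB q (PySem.Set.update s xs) ys := by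
  induction xs with
  | nil => intro s ys; simp [selB, PySem.Set.update_nil]
  | cons x xs ih =>
      intro s ys
      by_cases hx : x ∈ s
      · have hx' : ¬ (x ∉ s) := not_not_intro hx
        rw [List.cons_append, selB, if_neg hx', selB, if_neg hx', ih, PySem.Set.update_cons,
            PySem.Set.add_of_mem hx]
      · rw [List.cons_append, selB, if_pos hx, selB, if_pos hx, ih, PySem.Set.update_cons,
            List.append_assoc]

theorem selB_reverse (q : String → Bool) :
    ∀ l : List String, selB q PySem.Set.empty l.reverse = (selP q l).reverse := by
  intro l
  induction l with
  | nil => simp [selB, selP]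
  | cons c t ih =>
      rw [List.reverse_cons, selB_append, ih, selP]
      have hmem : (c ∈ PySem.Set.update PySem.Set.empty t.reverse) ↔ c ∈ t := by
        rw [PySem.Set.mem_update]
        simp [PySem.Set.empty]
      by_cases hct : c ∈ t
      · rw [if_neg (by simp [hct]), selB, if_neg (by simpa [hmem] using hct)]
        simp [selB]
      · by_cases hq : q c = true
        · rw [if_pos ⟨hct, hq⟩, selB, if_pos (by simpa [hmem] using hct), if_pos hq]
          simp [selB]
        · rw [if_neg (by simp [hq]), selB, if_pos (by simpa [hmem] using hct),
              if_neg hq]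
          simp [selB]

theorem basis_A_eq_selA (words : List String) :
    basis_of_py words
      = selA ((PySem.List.sorted words (fun w => PySem.Str.len w)).reverse) := by
  set ws := (PySem.List.sorted words (fun w => PySem.Str.len w)).reverse with hws
  have h0 : (0 : Int) = ((0 : Nat) : Int) := rfl
  have hlen : PySem.List.len ws = ((ws.length : Nat) : Int) := by
    simp [PySem.List.len_eq]
  rw [basis_of_py]
  simp only [← hws, hlen, h0]
  rw [rangeA_eq_loopA ws 0 PySem.Set.empty, List.drop_zero, loopA_eq_update,
      PySem.Set.update_empty]
  exact PySem.Set.ofList_eq_self_of_nodup _ (selA_nodup ws)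

theorem basis_B_eq_selP (words : List String) :
    basis_of_py_alt words
      = PySem.Set.ofList
          (selP (fun c => !(hasProperSubPy c (PySem.Set.ofList words)))
            ((PySem.List.sorted words (fun w => PySem.Str.len w)).reverse)) := by
  simp only [basis_of_py_alt]
  rw [foldB_eq_selB]
  have h := selB_reverse (fun c => !(hasProperSubPy c (PySem.Set.ofList words)))
    ((PySem.List.sorted words (fun w => PySem.Str.len w)).reverse)
  rw [List.reverse_reverse] at h
  rw [List.nil_append, h, List.reverse_reverse]

-- ===== VERDICT (by name: the statement is the Claim_ definition above) =====
theorem basis_of_py_spec : Claim_equal_basis_of_py := by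
  intro words _
  unfold Spec_basis_of_py
  set S := PySem.List.sorted words (fun w => PySem.Str.len w) with hS
  have hpw : (S.reverse).Pairwise (fun a b => b.toList.length ≤ a.toList.length) := by
    have h1 := PySem.List.sorted_pairwise words (fun w => PySem.Str.len w)
    rw [← hS] at h1
    rw [List.pairwise_reverse]
    refine h1.imp ?_
    intro a b hab
    simpa [PySem.Str.len_eq] using hab
  have hmemS : ∀ v, v ∈ S.reverse ↔ v ∈ words := by
    intro v
    rw [List.mem_reverse]
    exact (PySem.List.sorted_perm words (fun w => PySem.Str.len w) false).mem_iff
  have hsel := selA_eq_selP words S.reverse hpw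
    (fun c _ v hv _ => (hmemS v).mpr hv) (fun c hc => (hmemS c).mp hc)
  rw [basis_A_eq_selA, basis_B_eq_selP, ← hS, ← hsel]
  exact (PySem.Set.ofList_eq_self_of_nodup _ (selA_nodup S.reverse)).symm
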